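-- pv_equiv track=rewrite | github.com/we0-dev/we0-index | loader/segmenter/base_line_segmenter.py | _build_line_positions
-- ===== SOURCE A (Python) =====
-- from typing import List, Dict, Any, Tuple, Iterator
--
-- def _build_line_positions(text: str) -> List[Tuple[int, int]]:
--     """生成每行的字符位置范围列表 (start, end)"""
--     lines = []
--     start = 0
--     for line in text.split('\n'):
--         end = start + len(line)
--         lines.append((start, end))
--         start = end + 1  # 跳过换行符
--     return lines
-- ===== SOURCE B (Python) =====
-- def _build_line_positions(text):
--     """Boundary-table formulation: line ranges are derived from newline positions."""
--     nl = [i for i, c in enumerate(text) if c == '\n']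
--     bounds = [-1] + nl + [len(text)]
--     return [(a + 1, b) for a, b in zip(bounds, bounds[1:])]
-- ===== Notes on version B (the rewrite author's own statement) =====
-- stated objective: alternative
-- what changed: B computes the newline boundary positions once and derives each line's (start,end) range by pairing consecutive boundaries, instead of splitting the text and accumulating a running start offset over the pieces.
import Mathlib
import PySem

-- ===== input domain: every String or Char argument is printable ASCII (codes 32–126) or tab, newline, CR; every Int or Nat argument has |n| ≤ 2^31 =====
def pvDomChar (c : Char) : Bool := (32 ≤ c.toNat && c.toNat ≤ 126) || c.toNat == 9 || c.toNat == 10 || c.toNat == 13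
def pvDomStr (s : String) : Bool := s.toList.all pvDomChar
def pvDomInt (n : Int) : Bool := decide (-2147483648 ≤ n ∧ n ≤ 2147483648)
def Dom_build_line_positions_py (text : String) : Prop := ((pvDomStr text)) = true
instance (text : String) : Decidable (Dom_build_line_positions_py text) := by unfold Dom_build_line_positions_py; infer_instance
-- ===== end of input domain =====

-- B derives line ranges from the table of newline boundary positions instead of accumulating a running start over split('\n') pieces; same cost, different decomposition.

-- ===== PORT A =====
-- hand port of Python's text.split('\n') on code points (single non-empty separator char; exact: '' splits to [''])
def pySplitNl : List Char → List (List Char)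
  | [] => [[]]
  | c :: cs =>
    match pySplitNl cs with
    | [] => []  -- unreachable: pySplitNl never returns []
    | p :: ps => if c = '\n' then [] :: p :: ps else (c :: p) :: ps

def build_line_positions_py (text : String) : List (Int × Int) :=
  let st := (pySplitNl text.toList).foldl
    (fun (st : List (Int × Int) × Int) line =>
      let e := st.2 + (line.length : Int)
      (st.1 ++ [(st.2, e)], e + 1)) ([], 0)
  st.1

-- ===== PORT B =====
def build_line_positions_py_alt (text : String) : List (Int × Int) :=
  let nl : List Int := ((PySem.List.enumerate text.toList 0).filter (fun p => p.2 == '\n')).map (·.1)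
  let bounds : List Int := [(-1 : Int)] ++ nl ++ [PySem.Str.len text]
  -- bounds[1:] = bounds.tail (bounds is non-empty by construction)
  (bounds.zip bounds.tail).map (fun p => (p.1 + 1, p.2))

-- ===== PRECONDITION & SPEC =====
def Spec_build_line_positions_py (text : String) (out : List (Int × Int)) : Prop := out = build_line_positions_py_alt text
instance (text : String) (out : List (Int × Int)) : Decidable (Spec_build_line_positions_py text out) := by unfold Spec_build_line_positions_py; infer_instance

-- ===== CLAIM (what is proved, stated in full; the proofs are below) =====
def Claim_equal_build_line_positions_py : Prop := ∀ (text : String), Dom_build_line_positions_py text → Spec_build_line_positions_py text (build_line_positions_py text)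

-- ===== LEMMAS AND PROOFS =====

-- recursive form of A's loop
def goRec : List (List Char) → Int → List (Int × Int)
  | [], _ => []
  | p :: ps, s => (s, s + (p.length : Int)) :: goRec ps (s + (p.length : Int) + 1)

-- canonical per-character recursion, the bridge between the two ports
def fRec : List Char → Int → List (Int × Int)
  | [], s => [(s, s)]
  | c :: cs, s =>
    if c = '\n' then (s, s) :: fRec cs (s + 1)
    else
      match fRec cs (s + 1) with
      | [] => []
      | (_, b) :: r => (s, b) :: r

-- boundary-pairing recursion, the shape of B's zip
def pairsOf : Int → List Int → Int → List (Int × Int)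
  | prev, [], n => [(prev + 1, n)]
  | prev, i :: is, n => (prev + 1, i) :: pairsOf i is n

theorem pySplitNl_ne_nil (cs : List Char) : pySplitNl cs ≠ [] := by
  induction cs with
  | nil => simp [pySplitNl]
  | cons c cs ih =>
    obtain ⟨p, ps, h⟩ := List.exists_cons_of_ne_nil ih
    simp only [pySplitNl, h]
    split <;> simp

theorem foldl_goRec (ls : List (List Char)) (acc : List (Int × Int)) (s : Int) :
    (ls.foldl (fun (st : List (Int × Int) × Int) line =>
      (st.1 ++ [(st.2, st.2 + (line.length : Int))], st.2 + (line.length : Int) + 1)) (acc, s)).1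
      = acc ++ goRec ls s := by
  induction ls generalizing acc s with
  | nil => simp [goRec]
  | cons p ps ih => simp [List.foldl, goRec, ih]

theorem goRec_splitNl_eq_fRec (cs : List Char) (s : Int) :
    goRec (pySplitNl cs) s = fRec cs s := by
  induction cs generalizing s with
  | nil => simp [pySplitNl, goRec, fRec]
  | cons c cs ih =>
    obtain ⟨p, ps, hps⟩ := List.exists_cons_of_ne_nil (pySplitNl_ne_nil cs)
    simp only [pySplitNl, hps]
    by_cases hc : c = '\n'
    · simp [hc, goRec, fRec, ← ih, hps]
    · have h1 : fRec cs (s + 1) = (s + 1, s + 1 + (p.length : Int)) :: goRec ps (s + 1 + (p.length : Int) + 1) := by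
        rw [← ih, hps]; simp [goRec]
      simp only [if_neg hc, fRec, h1, goRec, List.length_cons]
      push_cast
      ring_nf

theorem fRec_eq_pairsOf (cs : List Char) (s : Int) :
    fRec cs s = pairsOf (s - 1)
      (((PySem.List.enumerate cs s).filter (fun p => p.2 == '\n')).map (·.1))
      (s + (cs.length : Int)) := by
  induction cs generalizing s with
  | nil => simp [fRec, PySem.List.enumerate_nil, pairsOf]
  | cons c cs ih =>
    rw [PySem.List.enumerate_cons]
    by_cases hc : c = '\n'
    · simp only [fRec, List.filter_cons, hc]
      simp only [beq_self_eq_true, if_pos, List.map_cons, pairsOf]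
      rw [ih]
      simp only [List.length_cons]
      push_cast
      ring_nf
    · simp only [fRec, if_neg hc, List.filter_cons]
      have hb : ((s, c).2 == '\n') = false := by simpa using hc
      rw [ih]
      cases hidx : ((PySem.List.enumerate cs (s + 1)).filter (fun p => p.2 == '\n')).map (·.1) with
      | nil =>
        simp [hb, hidx, pairsOf]
        ring_nf
      | cons i is =>
        simp [hb, hidx, pairsOf]
        have h2 : s + 1 + (cs.length : Int) = s + ((cs.length : Int) + 1) := by ring
        rw [h2]

theorem zip_pairsOf (is : List Int) (prev n : Int) :
    (((prev :: (is ++ [n])).zip (is ++ [n])).map (fun p => (p.1 + 1, p.2))) = pairsOf prev is n := by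
  induction is generalizing prev with
  | nil => simp [pairsOf]
  | cons i is ih => simp only [List.cons_append, List.zip_cons_cons, List.map_cons, pairsOf, ih]

-- ===== VERDICT (by name: the statement is the Claim_ definition above) =====
theorem build_line_positions_py_spec : Claim_equal_build_line_positions_py := by
  intro text _
  show build_line_positions_py text = build_line_positions_py_alt text
  unfold build_line_positions_py build_line_positions_py_alt
  rw [foldl_goRec, goRec_splitNl_eq_fRec, fRec_eq_pairsOf]
  simp only [List.nil_append, List.cons_append, List.tail_cons]
  rw [zip_pairsOf]
  norm_num [PySem.Str.len, PySem.Chars.len]
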